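-- pv_equiv track=rewrite | github.com/AndreiPiterbarg/compact_sidon | lasserre/z2_blockdiag.py | localizing_sigma_reps
-- ===== SOURCE A (Python) =====
-- from typing import Any, Dict, List, Sequence, Tuple
--
-- def localizing_sigma_reps(d: int) -> Tuple[List[int], List[Tuple[int, int]]]:
--     """Return canonical σ-representatives and pairs for localizing indices.
--
--     σ acts on {0, 1, ..., d-1} by i ↦ d-1-i.  Returns
--         fixed : list of i with σ(i) = i (only possible if d is odd).
--         pairs : list of (i, j) with i < j and σ(i) = j.  Exactly one
--                 representative per orbit, chosen as the smaller index.
--     """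
--     fixed: List[int] = []
--     pairs: List[Tuple[int, int]] = []
--     seen: set[int] = set()
--     for i in range(d):
--         if i in seen:
--             continue
--         si = d - 1 - i
--         if si == i:
--             fixed.append(i)
--             seen.add(i)
--             continue
--         lo, hi = (i, si) if i < si else (si, i)
--         pairs.append((lo, hi))
--         seen.add(lo)
--         seen.add(hi)
--     return fixed, pairs
-- ===== SOURCE B (Python) =====
-- from typing import List, Tuple
--
--
-- def localizing_sigma_reps(d: int) -> Tuple[List[int], List[Tuple[int, int]]]:
--     """Compute fixed points and pairs of i |-> d-1-i directly from the symmetry.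
--
--     The orbits with two elements are exactly {i, d-1-i} for 0 <= i < d//2,
--     in increasing order of the smaller index; the single fixed point d//2
--     exists exactly when d is positive and odd.
--     """
--     pairs = [(i, d - 1 - i) for i in range(d // 2)]
--     fixed = [d // 2] if d > 0 and d % 2 == 1 else []
--     return fixed, pairs
-- ===== Notes on version B (the rewrite author's own statement) =====
-- stated objective: simpler
-- what changed: B derives the result in closed form from the reflection symmetry: the pairs are (i, d-1-i) for i below half of d, and the single fixed point is the middle index exactly when d is positive and odd, eliminating A's visited-set bookkeeping and skip logic.
import Mathlib
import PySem

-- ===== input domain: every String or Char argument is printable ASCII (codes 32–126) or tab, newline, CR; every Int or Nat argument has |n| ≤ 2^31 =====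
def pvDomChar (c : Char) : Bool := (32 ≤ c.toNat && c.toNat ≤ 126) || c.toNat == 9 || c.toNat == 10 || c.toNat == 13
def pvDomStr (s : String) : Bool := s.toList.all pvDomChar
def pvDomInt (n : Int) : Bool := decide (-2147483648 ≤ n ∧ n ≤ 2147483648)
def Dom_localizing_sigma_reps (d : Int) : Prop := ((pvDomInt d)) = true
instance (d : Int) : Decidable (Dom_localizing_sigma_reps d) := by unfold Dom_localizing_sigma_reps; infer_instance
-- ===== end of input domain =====

-- B computes the σ-orbit pairs and the fixed point in closed form from the reflection symmetry,
-- replacing A's visited-set bookkeeping; same O(d) cost, simpler decomposition.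

-- ===== PORT A =====
-- One loop-body step of A: skip if i was seen, record a fixed point if σ(i)=i, else record the pair.
def stepA (d : Int) (st : List Int × List (Int × Int) × PySem.Set Int) (i : Int) :
    List Int × List (Int × Int) × PySem.Set Int :=
  if st.2.2.contains i then st
  else
    let si := d - 1 - i
    if si == i then (st.1 ++ [i], st.2.1, st.2.2.add i)
    else
      let lohi := if i < si then (i, si) else (si, i)
      (st.1, st.2.1 ++ [lohi], (st.2.2.add lohi.1).add lohi.2)

def localizing_sigma_reps (d : Int) : List Int × (List (Int × Int)) :=
  let r := (PySem.List.pyRange 0 d 1).foldl (stepA d) ([], [], PySem.Set.empty)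
  (r.1, r.2.1)

-- ===== PORT B =====
def localizing_sigma_reps_alt (d : Int) : List Int × (List (Int × Int)) :=
  (if 0 < d ∧ PySem.Int.mod d 2 = 1 then [PySem.Int.floordiv d 2] else [],
   (PySem.List.pyRange 0 (PySem.Int.floordiv d 2) 1).map (fun i => (i, d - 1 - i)))

-- ===== PRECONDITION & SPEC =====
def Spec_localizing_sigma_reps (d : Int) (out : List Int × (List (Int × Int))) : Prop := out = localizing_sigma_reps_alt d
instance (d : Int) (out : List Int × (List (Int × Int))) : Decidable (Spec_localizing_sigma_reps d out) := by unfold Spec_localizing_sigma_reps; infer_instance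

-- ===== CLAIM (what is proved, stated in full; the proofs are below) =====
def Claim_equal_localizing_sigma_reps : Prop := ∀ (d : Int), Dom_localizing_sigma_reps d → Spec_localizing_sigma_reps d (localizing_sigma_reps d)

-- ===== LEMMAS AND PROOFS =====

-- The seen-set A has built after processing the first k indices (k ≤ d//2).
def seenL (d : Int) (k : Nat) : List Int :=
  (List.range k).flatMap (fun i => [(i : Int), d - 1 - i])

lemma mem_seenL {d x : Int} {k : Nat} :
    x ∈ seenL d k ↔ ∃ i : Nat, i < k ∧ (x = (i : Int) ∨ x = d - 1 - (i : Int)) := by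
  simp [seenL, List.mem_flatMap, List.mem_range]

lemma contains_eq_mem (s : List Int) (x : Int) : s.contains x = true ↔ x ∈ s := by
  simp

-- Invariant for the first half of A's loop.
lemma foldA_first (d : Int) (k : Nat) (hk : (k : Int) ≤ PySem.Int.floordiv d 2) :
    (PySem.List.pyRange 0 (k : Int) 1).foldl (stepA d) ([], [], PySem.Set.empty) =
      ([], ((List.range k).map (fun i : Nat => (i : Int))).map (fun i => (i, d - 1 - i)), seenL d k) := by
  induction k with
  | zero => simp [seenL]
  | succ k ih =>
    have hk' : (k : Int) ≤ PySem.Int.floordiv d 2 := by push_cast at hk ⊢; omega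
    have hlt : ((k : Int) + 1) * 2 ≤ d := by
      rw [← PySem.Int.le_floordiv_iff_mul_le (by omega : (0:Int) < 2)]
      push_cast at hk ⊢; omega
    have hsplit : PySem.List.pyRange 0 ((k : Int) + 1) 1 =
        PySem.List.pyRange 0 (k : Int) 1 ++ [(k : Int)] :=
      PySem.List.pyRange_one_succ_right (by positivity)
    have hknotin : (k : Int) ∉ seenL d k := by
      rw [mem_seenL]; rintro ⟨i, hi, h | h⟩ <;> omega
    push_cast
    rw [hsplit, List.foldl_append, ih hk']
    simp only [List.foldl_cons, List.foldl_nil]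
    have hc1 : (seenL d k).contains (k : Int) = false := by
      rw [Bool.eq_false_iff]; intro h; exact hknotin ((contains_eq_mem _ _).mp h)
    simp only [stepA, PySem.Set.contains, hc1]
    have hne : ¬ (d - 1 - (k : Int) == (k : Int)) = true := by
      simp only [beq_iff_eq]; omega
    simp only [hne, if_false, Bool.false_eq_true]
    have hltk : (k : Int) < d - 1 - (k : Int) := by omega
    simp only [if_pos hltk, PySem.Set.add, PySem.Set.contains, hc1]
    simp [List.range_succ, seenL, List.flatMap_append]
    refine ⟨fun x hx => ⟨?_, ?_⟩, ?_⟩ <;> omega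

-- The loop skips every index already in the seen set.
lemma foldA_skip (d : Int) (st : List Int × List (Int × Int) × PySem.Set Int)
    (l : List Int) (h : ∀ i ∈ l, st.2.2.contains i = true) :
    l.foldl (stepA d) st = st := by
  induction l with
  | nil => rfl
  | cons a l ih =>
    have ha' : a ∈ st.2.2 := by simpa using h a (by simp)
    rw [List.foldl_cons, show stepA d st a = st from by simp [stepA, PySem.Set.contains, ha']]
    exact ih (fun i hi => h i (by simp [hi]))

lemma second_half_contains (d : Int) (q : Nat)
    (hq : ((q : Int)) = PySem.Int.floordiv d 2) (i : Int)
    (hi1 : d - (q : Int) ≤ i) (hi2 : i < d) : i ∈ seenL d q := by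
  rw [mem_seenL]
  have h2q : (q : Int) * 2 ≤ d := by
    rw [← PySem.Int.le_floordiv_iff_mul_le (by omega : (0:Int) < 2)]; omega
  refine ⟨(d - 1 - i).toNat, ?_, Or.inr ?_⟩ <;> omega

-- ===== VERDICT (by name: the statement is the Claim_ definition above) =====
theorem localizing_sigma_reps_spec : Claim_equal_localizing_sigma_reps := by
  intro d _
  unfold Spec_localizing_sigma_reps localizing_sigma_reps localizing_sigma_reps_alt
  by_cases hd : 0 < d
  · -- positive d
    set q : Int := PySem.Int.floordiv d 2 with hq
    have hmod := PySem.Int.floordiv_mul_add_mod d 2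
    have hm2 := PySem.Int.mod_two_eq d
    rw [← hq] at hmod
    have hq0 : 0 ≤ q := by omega
    have hqd : q ≤ d - q := by omega
    have hqnat : ((q.toNat : Int)) = q := Int.toNat_of_nonneg hq0
    have hsplit1 : PySem.List.pyRange 0 d 1 =
        PySem.List.pyRange 0 q 1 ++ PySem.List.pyRange q d 1 :=
      PySem.List.pyRange_one_append 0 q d hq0 (by omega)
    have hfirst := foldA_first d q.toNat (by rw [hqnat])
    rw [hqnat] at hfirst
    have hpairs : (PySem.List.pyRange 0 q 1).map (fun i => (i, d - 1 - i)) =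
        ((List.range q.toNat).map (fun i : Nat => (i : Int))).map (fun i => (i, d - 1 - i)) := by
      rw [PySem.List.pyRange_one]
      simp only [sub_zero, List.map_map, Function.comp_def, zero_add]
    rcases hm2 with he | ho
    · -- even d : d = 2q, second half = pyRange q d, all seen
      have hdq : d - q = q := by omega
      rw [hsplit1, List.foldl_append, hfirst, foldA_skip]
      · rw [if_neg (by omega : ¬ (0 < d ∧ PySem.Int.mod d 2 = 1)), hpairs]
      · intro i hi
        rw [PySem.List.mem_pyRange_one] at hi
        exact (contains_eq_mem _ _).mpr
          (second_half_contains d q.toNat (by rw [hqnat]) i (by omega) hi.2)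
    · -- odd d : d = 2q+1, middle index q is the fixed point
      have hsplit2 : PySem.List.pyRange q d 1 = (q : Int) :: PySem.List.pyRange (q + 1) d 1 :=
        PySem.List.pyRange_one_cons (by omega)
      have hqnot : ¬ (q ∈ seenL d q.toNat) := by
        rw [mem_seenL]; rintro ⟨i, hi, h | h⟩ <;> omega
      have hcq : (seenL d q.toNat).contains q = false := by
        rw [Bool.eq_false_iff]; intro h; exact hqnot ((contains_eq_mem _ _).mp h)
      rw [hsplit1, hsplit2, List.foldl_append, hfirst]
      simp only [List.foldl_cons]
      have hfx : stepA d ([], ((List.range q.toNat).map (fun i : Nat => (i : Int))).map (fun i => (i, d - 1 - i)), seenL d q.toNat) q =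
          ([q], ((List.range q.toNat).map (fun i : Nat => (i : Int))).map (fun i => (i, d - 1 - i)), seenL d q.toNat ++ [q]) := by
        simp only [stepA, PySem.Set.contains, hcq, Bool.false_eq_true, if_false]
        have : (d - 1 - q == q) = true := by simp only [beq_iff_eq]; omega
        simp [this, PySem.Set.add, PySem.Set.contains, hqnot]
      rw [hfx, foldA_skip]
      · rw [if_pos ⟨hd, ho⟩, hpairs]
      · intro i hi
        rw [PySem.List.mem_pyRange_one] at hi
        refine (contains_eq_mem _ _).mpr ?_
        simp only [List.mem_append]
        exact Or.inl (second_half_contains d q.toNat (by rw [hqnat]) i (by omega) hi.2)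
  · -- d ≤ 0 : both sides are ([], [])
    have h1 : PySem.List.pyRange 0 d 1 = [] := by
      rw [PySem.List.pyRange_one]
      have ht : (d - 0).toNat = 0 := by omega
      rw [ht]; rfl
    have hq : PySem.Int.floordiv d 2 < 1 := by
      rw [PySem.Int.floordiv_lt_iff_lt_mul (by omega : (0:Int) < 2)]; omega
    have h2 : PySem.List.pyRange 0 (PySem.Int.floordiv d 2) 1 = [] := by
      rw [PySem.List.pyRange_one]
      have ht : (PySem.Int.floordiv d 2 - 0).toNat = 0 := by omega
      rw [ht]; rfl
    rw [h1, h2]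
    have hcond : ¬ (0 < d ∧ PySem.Int.mod d 2 = 1) := fun h => absurd h.1 hd
    rw [if_neg hcond]
    rfl
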